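-- pv_equiv track=rewrite | github.com/NetworkwideFileSearch/filesearch1.0.0 | basic_search/inverted_index.py | tokenize_file_name
-- ===== SOURCE A (Python) =====
-- def tokenize_file_name(filename):
--     token_list = {}
--     word = ""
--     for i in filename:
--         if i.isalnum():
--             word += i.lower()
--         else:
--             if word in token_list:
--                 token_list[word] += 1
--             else:
--                 token_list[word] = 1
--             word = ""
--     if word in token_list:
--         token_list[word] += 1
--     else:
--         token_list[word] = 1
--     return token_list
-- ===== SOURCE B (Python) =====
-- def tokenize_file_name(filename):
--     # Normalize: lowercase alnum chars, collapse every other char to a '\0' sentinel,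
--     # then split on the sentinel (keeping empty tokens, as A's flush does) and tally.
--     normalized = "".join(c.lower() if c.isalnum() else "\0" for c in filename)
--     counts = {}
--     for t in normalized.split("\0"):
--         counts[t] = counts.get(t, 0) + 1
--     return counts
-- ===== Notes on version B (the rewrite author's own statement) =====
-- stated objective: alternative
-- what changed: Replaces A's single streaming flush loop (mutable current-word buffer with duplicated in-dict/else counting at each delimiter and at the end) by a normalize -> split-on-sentinel -> tally pipeline over an explicit token list.
import Mathlib
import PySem

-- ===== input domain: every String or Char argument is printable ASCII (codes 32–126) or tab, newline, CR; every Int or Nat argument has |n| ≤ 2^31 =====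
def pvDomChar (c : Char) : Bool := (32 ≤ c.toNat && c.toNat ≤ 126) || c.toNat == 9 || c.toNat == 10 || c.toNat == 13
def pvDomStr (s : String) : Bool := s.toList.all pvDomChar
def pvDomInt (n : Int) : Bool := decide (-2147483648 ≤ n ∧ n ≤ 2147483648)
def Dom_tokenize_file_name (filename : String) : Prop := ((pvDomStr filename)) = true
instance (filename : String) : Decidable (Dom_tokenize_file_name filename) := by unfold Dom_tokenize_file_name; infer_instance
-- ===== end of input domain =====

-- B replaces A's streaming flush loop by a normalize → split-on-sentinel → tally pipeline (alternative decomposition, same cost).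

-- ===== PORT A =====
-- the duplicated "if word in token_list: += 1 else: = 1" block of A
def pvFlush (d : PySem.Dict String Int) (w : String) : PySem.Dict String Int :=
  if d.contains w then d.insert w (d.getD w 0 + 1) else d.insert w 1

-- the body of A's for-loop over the characters
def pvStepA (st : PySem.Dict String Int × String) (i : Char) : PySem.Dict String Int × String :=
  if PySem.Chars.isalnum i then (st.1, st.2.push (PySem.Chars.lowerChar i)) else (pvFlush st.1 st.2, "")

def tokenize_file_name (filename : String) : List (String × Int) :=
  let st := filename.toList.foldl pvStepA ((PySem.Dict.empty : PySem.Dict String Int), "")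
  (pvFlush st.1 st.2).items

-- ===== PORT B =====
-- B's per-character normalizer: c.lower() if c.isalnum() else '\0'
def pvNorm (c : Char) : Char :=
  if PySem.Chars.isalnum c then PySem.Chars.lowerChar c else Char.ofNat 0

def tokenize_file_name_alt (filename : String) : List (String × Int) :=
  let normalized : List Char := filename.toList.map pvNorm
  let tokens : List String := (normalized.splitOn (Char.ofNat 0)).map String.ofList
  (tokens.foldl (fun d t => d.modify t 0 (· + 1)) (PySem.Dict.empty : PySem.Dict String Int)).items

-- ===== PRECONDITION & SPEC =====
def Spec_tokenize_file_name (filename : String) (out : List (String × Int)) : Prop := out = tokenize_file_name_alt filename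
instance (filename : String) (out : List (String × Int)) : Decidable (Spec_tokenize_file_name filename out) := by unfold Spec_tokenize_file_name; infer_instance

-- ===== CLAIM (what is proved, stated in full; the proofs are below) =====
def Claim_equal_tokenize_file_name : Prop := ∀ (filename : String), Dom_tokenize_file_name filename → Spec_tokenize_file_name filename (tokenize_file_name filename)

-- ===== LEMMAS AND PROOFS =====

-- A's flush is a counter bump
theorem pvFlush_eq_modify (d : PySem.Dict String Int) (w : String) :
    pvFlush d w = d.modify w 0 (· + 1) := by
  unfold pvFlush PySem.Dict.modify
  by_cases h : d.contains w
  · simp [h]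
  · have hnone : d.items.find? (fun p => p.1 == w) = none := by
      rcases hf : d.items.find? (fun p => p.1 == w) with _ | p
      · exact hf
      · have hp := List.find?_some hf
        have hm := List.mem_of_find?_eq_some hf
        exact absurd (show d.contains w = true from List.any_eq_true.mpr ⟨p, hm, hp⟩) h
    simp [h, PySem.Dict.getD, PySem.Dict.get?, hnone]

-- the token stream A flushes, starting with the partial word w
def pvTokens (w : List Char) : List Char → List (List Char)
  | [] => [w]
  | c :: cs => if PySem.Chars.isalnum c then pvTokens (w ++ [PySem.Chars.lowerChar c]) cs
               else w :: pvTokens [] cs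

theorem pvPush (w : List Char) (c : Char) : (String.ofList w).push c = String.ofList (w ++ [c]) := by
  rw [String.push_eq_append, String.ofList_append]; rfl

-- A's loop + final flush = one counter bump per flushed token
theorem lemA (cs : List Char) : ∀ (d : PySem.Dict String Int) (w : List Char),
    pvFlush (cs.foldl pvStepA (d, String.ofList w)).1 (cs.foldl pvStepA (d, String.ofList w)).2
      = (pvTokens w cs).foldl (fun d t => d.modify (String.ofList t) 0 (· + 1)) d := by
  induction cs with
  | nil => intro d w; simp [pvTokens, pvFlush_eq_modify]
  | cons c cs ih =>
    intro d w
    by_cases h : PySem.Chars.isalnum c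
    · simpa [pvStepA, pvTokens, h, pvPush] using ih d (w ++ [PySem.Chars.lowerChar c])
    · have hstep : pvStepA (d, String.ofList w) c = (pvFlush d (String.ofList w), String.ofList []) := by
        simp [pvStepA, h]
      rw [List.foldl_cons, hstep, ih (pvFlush d (String.ofList w)) [], pvTokens, if_neg h,
        List.foldl_cons, pvFlush_eq_modify]

theorem pvToNat (n : Nat) (h : n < 55296) : (Char.ofNat n).toNat = n := by
  rw [Char.toNat_ofNat]; simp [Nat.isValidChar, h]

theorem pvNorm_ne_sentinel (c : Char) (h : PySem.Chars.isalnum c = true) :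
    pvNorm c ≠ Char.ofNat 0 := by
  have h' := h
  simp only [PySem.Chars.isalnum, PySem.Chars.isalpha, PySem.Chars.isupper,
    PySem.Chars.islower, PySem.Chars.isdigit, Bool.or_eq_true, Bool.and_eq_true,
    decide_eq_true_eq, Char.le_def, UInt32.le_iff_toNat_le] at h'
  rw [show ('A' : Char).val.toNat = 65 from rfl, show ('Z' : Char).val.toNat = 90 from rfl,
    show ('a' : Char).val.toNat = 97 from rfl, show ('z' : Char).val.toNat = 122 from rfl,
    show ('0' : Char).val.toNat = 48 from rfl, show ('9' : Char).val.toNat = 57 from rfl] at h'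
  have hc : c.toNat = c.val.toNat := rfl
  have hz : (Char.ofNat 0).toNat = 0 := rfl
  unfold pvNorm PySem.Chars.lowerChar PySem.Chars.isupper
  rw [if_pos h]
  split_ifs with hu
  · simp only [Bool.and_eq_true, decide_eq_true_eq, Char.le_def, UInt32.le_iff_toNat_le] at hu
    rw [show ('A' : Char).val.toNat = 65 from rfl, show ('Z' : Char).val.toNat = 90 from rfl] at hu
    intro hEq
    have h2 := congrArg Char.toNat hEq
    rw [pvToNat (c.toNat + 32) (by rw [hc]; omega), hz, hc] at h2
    omega
  · intro hEq
    have h2 := congrArg Char.toNat hEq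
    rw [hz, hc] at h2
    rcases h' with (h'' | h'') | h'' <;> omega

theorem pvNorm_eq_sentinel (c : Char) (h : PySem.Chars.isalnum c = false) :
    pvNorm c = Char.ofNat 0 := by simp [pvNorm, h]

theorem modifyHead_nil_append (l : List (List Char)) :
    List.modifyHead (fun t => ([] : List Char) ++ t) l = l := by
  cases l <;> simp

-- A's token stream is exactly B's split of the normalized characters
theorem lemB (cs : List Char) : ∀ (w : List Char),
    pvTokens w cs = List.modifyHead (w ++ ·) (List.splitOnP (· == Char.ofNat 0) (cs.map pvNorm)) := by
  induction cs with
  | nil => intro w; simp [pvTokens]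
  | cons c cs ih =>
    intro w
    by_cases h : PySem.Chars.isalnum c
    · have hne := pvNorm_ne_sentinel c h
      have hn : pvNorm c = PySem.Chars.lowerChar c := by simp [pvNorm, h]
      rw [pvTokens, if_pos h, ih, List.map_cons, List.splitOnP_cons, if_neg (by simp [hne]), hn]
      cases List.splitOnP (· == Char.ofNat 0) (cs.map pvNorm) with
      | nil => simp
      | cons t ts => simp
    · have hp : (pvNorm c == Char.ofNat 0) = true := by simp [pvNorm_eq_sentinel c (by simpa using h)]
      rw [pvTokens, if_neg h, ih [], List.map_cons, List.splitOnP_cons, if_pos hp,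
        modifyHead_nil_append]
      cases List.splitOnP (· == Char.ofNat 0) (cs.map pvNorm) with
      | nil => simp
      | cons t ts => simp

-- ===== VERDICT (by name: the statement is the Claim_ definition above) =====
theorem tokenize_file_name_spec : Claim_equal_tokenize_file_name := by
  intro filename _
  unfold Spec_tokenize_file_name tokenize_file_name tokenize_file_name_alt
  have h0 : ("" : String) = String.ofList [] := rfl
  have hA := lemA filename.toList PySem.Dict.empty []
  simp only [h0]
  rw [hA, lemB filename.toList [], modifyHead_nil_append]
  simp [List.splitOn, List.foldl_map]
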